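-- pv_equiv track=rewrite | github.com/vapte/opec-nlp | parse_pdf.py | removeTablesGraphs
-- ===== SOURCE A (Python) =====
-- def removeTablesGraphs(corpus): #list of whole pdf
--     '''   Reference Basket  Arabian Light  Dubai  Bonny Light  Saharan Blend  Minas  Tia Juana Light  Isthmus  Other crudes  Brent  WTI US $/b  Mar. 23.70 23.77 23.67 24.35 24.82 25.64 21.08 22.60  24.42 27.27 Apr. 24.38 24.24 24.06 25.43 25.65 27.64 20.79 22.86  25.37 27.37 25.36 24.87 23.84 26.19 26.44 25.65 24.56 25.96  25.89 28.14  Differentials      WTI/Brent  Brent/Dubai 2.85 0.75 2.00 1.31 2.25 2.05 - 5 - \x0c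
--     example table '''
--     toRemove = []
--     for i in range(len(corpus)):
--         if (is_in_table(corpus, i)):
--             toRemove.append(i)
--
--     corpus_new = list()
--     for i in range(len(corpus)):
--         if (i in toRemove):
--             continue
--         else:
--             corpus_new.append(corpus[i])
--     return corpus_new
--
-- def is_in_table(corpus, idx):
--     if ('Table' in corpus[idx] or 'Graph' in corpus[idx]):
--         return True
--     offset = 3
--     back_check = [item for item in corpus[idx-offset+1:idx+1] if item.isalpha()]
--     front_check = [item for item in corpus[idx:idx+offset] if item.isalpha()]
--     if (len(back_check)==0 or len(front_check)==0):
--         return True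
--     return False
-- ===== SOURCE B (Python) =====
-- def removeTablesGraphs(corpus):
--     # one pass with a prefix-sum of isalpha flags: the back/front window checks of
--     # is_in_table become O(1) count lookups instead of building filtered slices.
--     n = len(corpus)
--     pref = [0] * (n + 1)
--     for i in range(n):
--         pref[i + 1] = pref[i] + (1 if corpus[i].isalpha() else 0)
--
--     def cnt(a, b):
--         # number of isalpha lines in corpus[a:b] (Python slice semantics)
--         if a < 0:
--             a += n
--         if b < 0:
--             b += n
--         a = min(max(a, 0), n)
--         b = min(max(b, 0), n)
--         return pref[b] - pref[a] if b > a else 0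
--
--     out = []
--     for i in range(n):
--         s = corpus[i]
--         if 'Table' in s or 'Graph' in s:
--             continue
--         if cnt(i - 2, i + 1) == 0 or cnt(i, i + 3) == 0:
--             continue
--         out.append(s)
--     return out
-- ===== Notes on version B (the rewrite author's own statement) =====
-- stated objective: alternative
-- what changed: Replaces A's two staged passes (collect a toRemove index list, then skip indices via 'i in toRemove') and is_in_table's per-index filtered window slices with one pass over a precomputed prefix-sum array of isalpha flags, so each back/front window check is a constant-time count lookup and no index list, membership scan or slice exists.
import Mathlib
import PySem

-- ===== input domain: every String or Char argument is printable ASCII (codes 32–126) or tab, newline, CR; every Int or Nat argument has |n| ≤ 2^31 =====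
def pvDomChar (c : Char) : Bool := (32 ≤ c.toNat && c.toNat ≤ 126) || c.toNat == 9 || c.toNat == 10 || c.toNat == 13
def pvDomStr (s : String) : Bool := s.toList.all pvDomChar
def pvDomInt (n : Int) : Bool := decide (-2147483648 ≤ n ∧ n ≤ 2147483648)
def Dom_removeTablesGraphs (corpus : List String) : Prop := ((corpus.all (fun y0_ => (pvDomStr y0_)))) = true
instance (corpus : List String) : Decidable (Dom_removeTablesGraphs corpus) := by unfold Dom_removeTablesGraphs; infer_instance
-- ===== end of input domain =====

-- B replaces A's two staged passes and per-index filtered window slices with one pass over a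
-- precomputed prefix-sum array of isalpha flags (alternative algorithm, same result).

-- ===== PORT A =====
-- helper is_in_table, verbatim from A (negative-index slices included)
def isInTable (corpus : List String) (idx : Int) : Bool :=
  if PySem.Str.isIn "Table" (PySem.List.pyGetD corpus idx "")
      || PySem.Str.isIn "Graph" (PySem.List.pyGetD corpus idx "") then
    true
  else
    let offset : Int := 3
    let back_check := (PySem.List.slice corpus (some (idx - offset + 1)) (some (idx + 1))).filter
      (fun item => PySem.Str.strIsalpha item)
    let front_check := (PySem.List.slice corpus (some idx) (some (idx + offset))).filter
      (fun item => PySem.Str.strIsalpha item)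
    if back_check.length = 0 || front_check.length = 0 then true else false

def removeTablesGraphs (corpus : List String) : List String :=
  let toRemove : List Int :=
    (PySem.List.pyRange 0 corpus.length 1).foldl
      (fun acc i => if isInTable corpus i then acc ++ [i] else acc) []
  (PySem.List.pyRange 0 corpus.length 1).foldl
    (fun acc i => if toRemove.contains i then acc else acc ++ [PySem.List.pyGetD corpus i ""]) []

-- ===== PORT B =====
-- prefix sums of isalpha flags (Source B builds pref[0..n] left to right)
def altPref (corpus : List String) : List Int :=
  corpus.foldl
    (fun p s => p ++ [p.getLast?.getD 0 + (if PySem.Str.strIsalpha s then 1 else 0)]) [0]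

-- cnt(a, b) from Source B: number of isalpha lines in corpus[a:b], via two pref lookups
def altCnt (n : Int) (pref : List Int) (a b : Int) : Int :=
  let a1 := if a < 0 then a + n else a
  let b1 := if b < 0 then b + n else b
  let a2 := min (max a1 0) n
  let b2 := min (max b1 0) n
  if b2 > a2 then PySem.List.pyGetD pref b2 0 - PySem.List.pyGetD pref a2 0 else 0

def removeTablesGraphs_alt (corpus : List String) : List String :=
  let n : Int := corpus.length
  let pref := altPref corpus
  (PySem.List.pyRange 0 n 1).foldl
    (fun out i =>
      let s := PySem.List.pyGetD corpus i ""
      if PySem.Str.isIn "Table" s || PySem.Str.isIn "Graph" s then out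
      else if altCnt n pref (i - 2) (i + 1) = 0 || altCnt n pref i (i + 3) = 0 then out
      else out ++ [s]) []

-- ===== PRECONDITION & SPEC =====
def Spec_removeTablesGraphs (corpus : List String) (out : List String) : Prop := out = removeTablesGraphs_alt corpus
instance (corpus : List String) (out : List String) : Decidable (Spec_removeTablesGraphs corpus out) := by unfold Spec_removeTablesGraphs; infer_instance

-- ===== CLAIM =====
def Claim_equal_removeTablesGraphs : Prop := ∀ (corpus : List String), Dom_removeTablesGraphs corpus → Spec_removeTablesGraphs corpus (removeTablesGraphs corpus)

-- ===== LEMMAS AND PROOFS =====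

-- loop shape: skip when p holds, else append f i
lemma foldl_skip_if {α β : Type} (p : α → Bool) (f : α → β) (xs : List α) (acc : List β) :
    xs.foldl (fun a i => if p i then a else a ++ [f i]) acc
      = acc ++ (xs.filter (fun i => ! p i)).map f := by
  induction xs generalizing acc with
  | nil => simp
  | cons x xs ih =>
    by_cases h : p x = true <;> simp [h, ih, List.append_assoc]

-- membership in toRemove (= filtered range) agrees with isInTable on every range element
lemma contains_filter_range (corpus : List String) (i : Int)
    (hi : i ∈ PySem.List.pyRange 0 corpus.length 1) :
    ((PySem.List.pyRange 0 corpus.length 1).filter (fun j => isInTable corpus j)).contains i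
      = isInTable corpus i := by
  by_cases h : isInTable corpus i = true
  · rw [h]
    exact List.elem_eq_true_of_mem (List.mem_filter.mpr ⟨hi, h⟩)
  · rw [Bool.eq_false_iff.mpr h]
    simp only [List.contains_eq_mem, decide_eq_false_iff_not, List.mem_filter]
    exact fun ⟨_, hp⟩ => h hp

-- the prefix list is the list of alpha-counts of the prefixes
lemma altPref_eq (corpus : List String) :
    altPref corpus
      = (List.range (corpus.length + 1)).map
          (fun k => (((corpus.take k).countP (fun s => PySem.Str.strIsalpha s)) : Int)) := by
  unfold altPref
  induction corpus using List.reverseRecOn with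
  | nil => simp
  | append_singleton xs x ih =>
    rw [List.foldl_append, ih]
    simp only [List.foldl_cons, List.foldl_nil]
    rw [List.length_append, List.length_singleton, List.range_succ (n := xs.length + 1),
      List.map_append]
    congr 1
    · apply List.map_congr_left
      intro k hk
      rw [List.mem_range] at hk
      rw [List.take_append_of_le_length (by omega)]
    · have hsplit : (List.range (xs.length + 1)).map
          (fun k => (((xs.take k).countP (fun s => PySem.Str.strIsalpha s)) : Int))
          = (List.range xs.length).map
              (fun k => (((xs.take k).countP (fun s => PySem.Str.strIsalpha s)) : Int))
            ++ [((xs.countP (fun s => PySem.Str.strIsalpha s)) : Int)] := by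
        rw [List.range_succ, List.map_append]
        simp
      rw [hsplit, List.getLast?_concat, Option.getD_some]
      simp only [List.map_singleton]
      rw [List.take_of_length_le (by simp), List.countP_append]
      simp [List.countP_cons]

-- the Int clamp in altCnt is exactly PySem's slice-bound resolution
lemma clamp_eq_clampIdx (n : Nat) (a : Int) :
    min (max (if a < 0 then a + n else a) 0) (n : Int) = ((PySem.List.clampIdx n a : Nat) : Int) := by
  unfold PySem.List.clampIdx
  split_ifs <;> omega

lemma pref_lookup (corpus : List String) (k : Nat) (hk : k ≤ corpus.length) :
    PySem.List.pyGetD (altPref corpus) (k : Int) 0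
      = (((corpus.take k).countP (fun s => PySem.Str.strIsalpha s)) : Int) := by
  rw [altPref_eq, PySem.List.pyGetD_natCast, PySem.List.getD_map_range _ _ _ _ (by omega)]

-- cnt(a, b) counts the isalpha lines of the Python slice corpus[a:b]
lemma altCnt_eq (corpus : List String) (a b : Int) :
    altCnt corpus.length (altPref corpus) a b
      = (((PySem.List.slice corpus (some a) (some b)).countP (fun s => PySem.Str.strIsalpha s)) : Int) := by
  unfold altCnt
  simp only [clamp_eq_clampIdx]
  set a' := PySem.List.clampIdx corpus.length a with ha'
  set b' := PySem.List.clampIdx corpus.length b with hb'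
  have haL : a' ≤ corpus.length := PySem.List.clampIdx_le _ _
  have hbL : b' ≤ corpus.length := PySem.List.clampIdx_le _ _
  have hslice : PySem.List.slice corpus (some a) (some b)
      = (corpus.drop a').take (b' - a') := by
    simp [PySem.List.slice, ha', hb']
  rw [hslice]
  by_cases h : a' < b'
  · rw [if_pos (by exact_mod_cast h), pref_lookup _ _ hbL, pref_lookup _ _ haL]
    rw [← List.drop_take]
    have hsplit : corpus.take b' = corpus.take a' ++ (corpus.take b').drop a' := by
      conv_lhs => rw [← List.take_append_drop a' (corpus.take b')]
      rw [List.take_take, Nat.min_eq_left (le_of_lt h)]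
    have : (corpus.take b').countP (fun s => PySem.Str.strIsalpha s)
        = (corpus.take a').countP (fun s => PySem.Str.strIsalpha s)
          + ((corpus.take b').drop a').countP (fun s => PySem.Str.strIsalpha s) := by
      conv_lhs => rw [hsplit]
      rw [List.countP_append]
    omega
  · rw [if_neg (by exact_mod_cast h)]
    have : b' - a' = 0 := by omega
    simp [this]

-- is_in_table as the disjunction B's loop body tests (cnt-based, via altCnt_eq)
lemma isInTable_eq (corpus : List String) (i : Int) :
    isInTable corpus i
      = ((PySem.Str.isIn "Table" (PySem.List.pyGetD corpus i "")
          || PySem.Str.isIn "Graph" (PySem.List.pyGetD corpus i ""))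
        || (decide (altCnt corpus.length (altPref corpus) (i - 2) (i + 1) = 0)
            || decide (altCnt corpus.length (altPref corpus) i (i + 3) = 0))) := by
  unfold isInTable
  by_cases htg : (PySem.Str.isIn "Table" (PySem.List.pyGetD corpus i "")
      || PySem.Str.isIn "Graph" (PySem.List.pyGetD corpus i "")) = true
  · rw [if_pos htg, htg, Bool.true_or]
  · rw [if_neg htg, Bool.eq_false_iff.mpr htg, Bool.false_or]
    change (if (decide (((PySem.List.slice corpus (some (i - 3 + 1)) (some (i + 1))).filter
        (fun item => PySem.Str.strIsalpha item)).length = 0)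
      || decide (((PySem.List.slice corpus (some i) (some (i + 3))).filter
        (fun item => PySem.Str.strIsalpha item)).length = 0)) = true then true else false) = _
    rw [show i - 3 + 1 = i - 2 by ring]
    rw [altCnt_eq, altCnt_eq, List.countP_eq_length_filter, List.countP_eq_length_filter]
    simp

-- B's loop is the single filter-map pass over the range, with ¬ is_in_table as the keep test
lemma alt_eq (corpus : List String) :
    removeTablesGraphs_alt corpus
      = ((PySem.List.pyRange 0 corpus.length 1).filter (fun i => ! isInTable corpus i)).map
          (fun i => PySem.List.pyGetD corpus i "") := by
  unfold removeTablesGraphs_alt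
  change (PySem.List.pyRange 0 (corpus.length : Int) 1).foldl
      (fun out i =>
        if PySem.Str.isIn "Table" (PySem.List.pyGetD corpus i "")
            || PySem.Str.isIn "Graph" (PySem.List.pyGetD corpus i "") then out
        else if altCnt corpus.length (altPref corpus) (i - 2) (i + 1) = 0
            || altCnt corpus.length (altPref corpus) i (i + 3) = 0 then out
        else out ++ [PySem.List.pyGetD corpus i ""]) [] = _
  have hstep : (fun (out : List String) (i : Int) =>
        if PySem.Str.isIn "Table" (PySem.List.pyGetD corpus i "")
            || PySem.Str.isIn "Graph" (PySem.List.pyGetD corpus i "") then out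
        else if altCnt corpus.length (altPref corpus) (i - 2) (i + 1) = 0
            || altCnt corpus.length (altPref corpus) i (i + 3) = 0 then out
        else out ++ [PySem.List.pyGetD corpus i ""])
      = (fun out i => if isInTable corpus i then out
                      else out ++ [PySem.List.pyGetD corpus i ""]) := by
    funext out i
    rw [isInTable_eq]
    simp only [Bool.or_eq_true, decide_eq_true_eq]
    split_ifs <;> tauto
  rw [hstep, foldl_skip_if, List.nil_append]

-- ===== VERDICT =====
theorem removeTablesGraphs_spec : Claim_equal_removeTablesGraphs := by
  intro corpus _
  unfold Spec_removeTablesGraphs removeTablesGraphs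
  rw [PySem.List.foldl_append_if_eq_filter, List.nil_append, foldl_skip_if, List.nil_append,
    alt_eq corpus]
  congr 1
  apply List.filter_congr
  intro i hi
  rw [contains_filter_range corpus i hi]
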